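-- pv_equiv track=rewrite | github.com/Ezwal/sp | sp/sp.py | char_encode_wide
-- ===== SOURCE A (Python) =====
-- ss = {
--     0: '\u0020',
--     1: '\u00A0',
--     2: '\u202F',
--     4: '\u2007',
--     8: '\u2060'
-- }
--
-- def char_encode_wide(c: str) -> str:
--     ord_c = ord(c)
--     ct = [''] * 4
--     for u_char in range(4):
--         for m_shift in range(4):
--             masked = (2 ** m_shift) & ord_c
--             ct[u_char] += ss[masked]
--         ord_c = ord_c >> 4
--     return ''.join(ct)
-- ===== SOURCE B (Python) =====
-- ss = {
--     0: '\u0020',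
--     1: '\u00A0',
--     2: '\u202F',
--     4: '\u2007',
--     8: '\u2060'
-- }
--
-- # 16-entry table: TABLE[n] is the 4-glyph encoding of nibble n.
-- TABLE = [ss[1 & n] + ss[2 & n] + ss[4 & n] + ss[8 & n] for n in range(16)]
--
-- def char_encode_wide(c: str) -> str:
--     n = ord(c)
--     out = []
--     for _ in range(4):
--         out.append(TABLE[n & 0xF])
--         n >>= 4
--     return ''.join(out)
-- ===== Notes on version B (the rewrite author's own statement) =====
-- stated objective: simpler
-- what changed: Replaces the inner per-bit loop and mask/dict lookups with a precomputed 16-entry nibble table consulted once per nibble while peeling the low four bits of the code point.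
import Mathlib
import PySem

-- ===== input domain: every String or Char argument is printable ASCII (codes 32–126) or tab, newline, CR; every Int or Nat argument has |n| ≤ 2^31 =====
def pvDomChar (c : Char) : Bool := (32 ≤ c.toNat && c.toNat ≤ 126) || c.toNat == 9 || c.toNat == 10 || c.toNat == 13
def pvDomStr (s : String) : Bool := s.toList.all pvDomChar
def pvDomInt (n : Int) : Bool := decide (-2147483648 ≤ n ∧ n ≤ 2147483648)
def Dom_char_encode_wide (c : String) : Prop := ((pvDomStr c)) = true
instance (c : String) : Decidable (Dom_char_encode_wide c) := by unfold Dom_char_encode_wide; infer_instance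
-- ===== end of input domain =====

-- B replaces A's inner per-bit loop by a precomputed 16-entry nibble table (objective: simpler).

-- ===== PORT A =====
-- dict ss; keys are exactly {0,1,2,4,8}, the only values (2^m) & ord_c can take, so lookup never raises
def ssA (n : Nat) : String :=
  if n = 0 then " "
  else if n = 1 then "\u00A0"
  else if n = 2 then "\u202F"
  else if n = 4 then "\u2007"
  else "\u2060"

-- body of A after ord(c): the two nested range(4) loops over (ct, ord_c)
def encodeA (ordc : Nat) : String :=
  let st := (List.range 4).foldl
    (fun (st : List String × Nat) _u =>
      let row := (List.range 4).foldl
        (fun (acc : String) m => acc ++ ssA ((2 ^ m) &&& st.2)) ""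
      (st.1 ++ [row], st.2 >>> 4)) ([], ordc)
  String.join st.1

def char_encode_wide (c : String) : String :=
  match c.toList with
  | [ch] => encodeA ch.toNat   -- ord(c)
  | _ => ""                    -- ord raises TypeError here; excluded by Pre_

-- ===== PORT B =====
-- Source B's own copy of the ss dict (as a total function on its key set)
def ssB (n : Nat) : String :=
  if n = 0 then " "
  else if n = 1 then "\u00A0"
  else if n = 2 then "\u202F"
  else if n = 4 then "\u2007"
  else "\u2060"

def TABLE : List String :=
  (List.range 16).map (fun n => ssB (1 &&& n) ++ ssB (2 &&& n) ++ ssB (4 &&& n) ++ ssB (8 &&& n))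

def encodeB (ordc : Nat) : String :=
  let st := (List.range 4).foldl
    (fun (st : List String × Nat) _ =>
      (st.1 ++ [TABLE.getD (st.2 &&& 15) ""], st.2 >>> 4)) ([], ordc)
  String.join st.1

def char_encode_wide_alt (c : String) : String :=
  if c.toList.length = 1 then encodeB ((c.toList.headD ' ').toNat)  -- ord(c)
  else ""                                                           -- ord raises TypeError; outside Pre_

-- ===== PRECONDITION & SPEC =====
-- ord(c) raises TypeError unless c has exactly one character
def Pre_char_encode_wide (c : String) : Prop := c.toList.length = 1
instance (c : String) : Decidable (Pre_char_encode_wide c) := by unfold Pre_char_encode_wide; infer_instance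
def pvWitness_char_encode_wide : String := "A"

def Spec_char_encode_wide (c : String) (out : String) : Prop := out = char_encode_wide_alt c
instance (c : String) (out : String) : Decidable (Spec_char_encode_wide c out) := by unfold Spec_char_encode_wide; infer_instance

-- ===== CLAIM (what is proved, stated in full; the proofs are below) =====
def Claim_equal_char_encode_wide : Prop := ∀ (c : String), Dom_char_encode_wide c → Pre_char_encode_wide c → Spec_char_encode_wide c (char_encode_wide c)

-- ===== LEMMAS AND PROOFS =====
theorem encode_eq : ∀ n < 128, encodeA n = encodeB n := by decide

-- ===== VERDICT =====
theorem char_encode_wide_spec : Claim_equal_char_encode_wide := by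
  intro c hdom hpre
  unfold Spec_char_encode_wide char_encode_wide char_encode_wide_alt
  unfold Pre_char_encode_wide at hpre
  unfold Dom_char_encode_wide pvDomStr at hdom
  obtain ⟨ch, h⟩ : ∃ ch, c.toList = [ch] := List.length_eq_one_iff.mp hpre
  simp only [h, List.all_cons, List.all_nil, Bool.and_true] at hdom
  simp only [char_encode_wide, char_encode_wide_alt, h, List.length_cons,
    List.length_nil, List.headD, if_true, reduceIte]
  apply encode_eq
  unfold pvDomChar at hdom
  simp only [Bool.or_eq_true, Bool.and_eq_true, decide_eq_true_eq, beq_iff_eq] at hdom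
  omega
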